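-- pv_equiv track=rewrite | github.com/grumat/artillery-x4-pro_config | unbrick-swx4/i18n.py | SelectBestLanguage
-- ===== SOURCE A (Python) =====
-- def SelectBestLanguage(preferred_locales, supported_languages, default_language):
-- 	"""
-- 	Selects the best language from supported_languages based on preferred_locales.
-- 	"""
-- 	for user_lang in preferred_locales:
-- 		if user_lang in supported_languages:
-- 			return user_lang
-- 	flex = {}
-- 	for l in supported_languages:
-- 		flex[l.split('_')[0]] = l
-- 	for user_lang in preferred_locales:
-- 		l = user_lang.split('_')[0]
-- 		if l in flex:
-- 			return flex[l]
-- 	return default_language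
-- ===== SOURCE B (Python) =====
-- def SelectBestLanguage(preferred_locales, supported_languages, default_language):
--     # Single pass over preferred_locales: return at the first exact match;
--     # while scanning, lazily remember the prefix-fallback for the FIRST
--     # preferred locale whose prefix matches any supported language
--     # (keeping the LAST such supported language, dict-overwrite semantics).
--     fallback = None
--     for user_lang in preferred_locales:
--         if user_lang in supported_languages:
--             return user_lang
--         if fallback is None:
--             p = user_lang.split('_')[0]
--             for l in supported_languages:
--                 if l.split('_')[0] == p:
--                     fallback = l
--     return fallback if fallback is not None else default_language
-- ===== Notes on version B (the rewrite author's own statement) =====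
-- stated objective: alternative
-- what changed: A runs two staged full passes over preferred_locales (exact-match pass, then a prefix pass against a precomputed prefix dict); B is a single pass with an accumulator: it returns at the first exact match and, along the way, lazily records the prefix fallback (last supported language whose prefix matches) for the first preferred locale that has one.
import Mathlib
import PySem

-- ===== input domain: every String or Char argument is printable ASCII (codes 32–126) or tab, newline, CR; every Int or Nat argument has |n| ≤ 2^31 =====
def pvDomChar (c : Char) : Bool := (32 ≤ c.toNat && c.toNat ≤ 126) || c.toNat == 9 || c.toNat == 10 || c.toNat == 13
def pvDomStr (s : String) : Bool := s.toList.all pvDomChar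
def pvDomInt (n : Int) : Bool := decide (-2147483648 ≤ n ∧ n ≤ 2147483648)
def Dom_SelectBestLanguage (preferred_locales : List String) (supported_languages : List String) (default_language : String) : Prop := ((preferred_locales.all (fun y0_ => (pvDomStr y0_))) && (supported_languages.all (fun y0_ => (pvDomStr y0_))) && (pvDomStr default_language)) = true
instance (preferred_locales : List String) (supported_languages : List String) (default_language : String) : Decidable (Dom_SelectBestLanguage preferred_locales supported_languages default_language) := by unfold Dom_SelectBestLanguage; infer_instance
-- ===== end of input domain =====

-- B replaces A's two staged passes (exact match, then prefix lookup in a precomputed dict) with ONE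
-- pass carrying a lazily-computed fallback accumulator (alternative decomposition, same cost).

-- ===== PORT A =====
-- user_lang.split('_')[0] (split on a nonempty separator is never empty, so headD is exact)
def pvPfx (s : String) : String := ((PySem.Str.split? s "_").getD []).headD ""

def pvALoop1 (supported : List String) : List String → Option String
  | [] => none
  | u :: rest => if supported.contains u then some u else pvALoop1 supported rest

def pvAFlex (supported : List String) : PySem.Dict String String :=
  supported.foldl (fun d l => d.insert (pvPfx l) l) PySem.Dict.empty

def pvALoop2 (flex : PySem.Dict String String) (dl : String) : List String → String
  | [] => dl
  | u :: rest =>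
    match flex.get? (pvPfx u) with
    | some v => v
    | none => pvALoop2 flex dl rest

def SelectBestLanguage (preferred_locales : List String) (supported_languages : List String) (default_language : String) : String :=
  match pvALoop1 supported_languages preferred_locales with
  | some u => u
  | none => pvALoop2 (pvAFlex supported_languages) default_language preferred_locales

-- ===== PORT B =====
-- inner scan of B: last supported language whose prefix equals p (None if no match)
def pvBLast (supported : List String) (p : String) : Option String :=
  supported.foldl (fun best l => if pvPfx l == p then some l else best) none

-- the single B loop: return at first exact match, carry the fallback accumulator
def pvBGo (sl : List String) (dl : String) (fallback : Option String) : List String → String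
  | [] => match fallback with
          | some v => v
          | none => dl
  | u :: rest =>
    if sl.contains u then u
    else
      pvBGo sl dl (match fallback with
                   | some v => some v
                   | none => pvBLast sl (pvPfx u)) rest

def SelectBestLanguage_alt (preferred_locales : List String) (supported_languages : List String) (default_language : String) : String :=
  pvBGo supported_languages default_language none preferred_locales

-- ===== PRECONDITION & SPEC =====
def Spec_SelectBestLanguage (preferred_locales : List String) (supported_languages : List String) (default_language : String) (out : String) : Prop := out = SelectBestLanguage_alt preferred_locales supported_languages default_language
instance (preferred_locales : List String) (supported_languages : List String) (default_language : String) (out : String) : Decidable (Spec_SelectBestLanguage preferred_locales supported_languages default_language out) := by unfold Spec_SelectBestLanguage; infer_instance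

-- ===== CLAIM (what is proved, stated in full; the proofs are below) =====
def Claim_equal_SelectBestLanguage : Prop := ∀ (preferred_locales : List String) (supported_languages : List String) (default_language : String), Dom_SelectBestLanguage preferred_locales supported_languages default_language → Spec_SelectBestLanguage preferred_locales supported_languages default_language (SelectBestLanguage preferred_locales supported_languages default_language)

-- ===== LEMMAS AND PROOFS =====
-- proof-only helper: A's second pass written with pvBLast instead of the dict
def pvMLoop2 (sl : List String) (dl : String) : List String → String
  | [] => dl
  | u :: rest =>
    match pvBLast sl (pvPfx u) with
    | some v => v
    | none => pvMLoop2 sl dl rest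

theorem pvFlex_get (sl : List String) (d : PySem.Dict String String) (p : String) :
    (sl.foldl (fun d l => d.insert (pvPfx l) l) d).get? p
      = sl.foldl (fun best l => if pvPfx l == p then some l else best) (d.get? p) := by
  induction sl generalizing d with
  | nil => rfl
  | cons l rest ih =>
    simp only [List.foldl]
    rw [ih]
    by_cases h : pvPfx l = p
    · subst h; rw [PySem.Dict.get?_insert_self]; simp
    · rw [PySem.Dict.get?_insert_of_ne _ _ (by simpa using Ne.symm h)]
      simp [h]

theorem pvAFlex_get (sl : List String) (p : String) :
    (pvAFlex sl).get? p = pvBLast sl p := by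
  unfold pvAFlex pvBLast
  rw [pvFlex_get]
  rfl

theorem pvALoop2_eq (sl : List String) (dl : String) (pl : List String) :
    pvALoop2 (pvAFlex sl) dl pl = pvMLoop2 sl dl pl := by
  induction pl with
  | nil => rfl
  | cons u rest ih =>
    simp only [pvALoop2, pvMLoop2, pvAFlex_get]
    cases pvBLast sl (pvPfx u) with
    | none => exact ih
    | some v => rfl

-- B's single pass with accumulator fb equals: first exact match if any, else fb if set, else A's prefix pass
theorem pvBGo_char (sl : List String) (dl : String) (fb : Option String) (pl : List String) :
    pvBGo sl dl fb pl
      = match pvALoop1 sl pl with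
        | some u => u
        | none => match fb with
                  | some v => v
                  | none => pvMLoop2 sl dl pl := by
  induction pl generalizing fb with
  | nil => cases fb <;> rfl
  | cons u rest ih =>
    by_cases hm : u ∈ sl
    · simp [pvBGo, pvALoop1, hm]
    · simp only [pvBGo, pvALoop1, List.elem_eq_contains.symm, List.elem_eq_mem, hm,
        decide_false, Bool.false_eq_true, ite_false]
      rw [ih]
      cases fb with
      | some v => simp
      | none =>
        cases h : pvBLast sl (pvPfx u) with
        | none => simp [pvMLoop2, h]
        | some v => cases pvALoop1 sl rest <;> simp [pvMLoop2, h]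

-- ===== VERDICT (by name: the statement is the Claim_ definition above) =====
theorem SelectBestLanguage_spec : Claim_equal_SelectBestLanguage := by
  intro pl sl dl _
  unfold Spec_SelectBestLanguage SelectBestLanguage SelectBestLanguage_alt
  rw [pvBGo_char, pvALoop2_eq]
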